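-- pv_equiv track=rewrite | github.com/DragonBuilder/6-0001-introduction-to-computer-science-and-programming-in-python-fall-2016-Assignment-Solutions | PS3/ps3.py | isWildcardWordValid
-- ===== SOURCE A (Python) =====
-- VOWELS = 'aeiou'
--
-- def isWildcardWordValid(word, wildcard_index, word_list):
--
--     ## sub string of the given word till the *
--     till_wildcard = word[:wildcard_index]
--
--     ## sub string of the given word after the *
--     after_wildcard = word[wildcard_index+1:]
--
--     ## a list of possible valid word(s) that can be formed by the given word with wildcard
--     possible_words = []
--     #possible_with_vowels = []
--
--     # check if any valid word can be formed with any letter in alphabet substituted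
--     # in place of wildcard('*')
--     for a_word in word_list:
--         ## a word is only a possiblity if the word with wildcard and word under consideration(a_word) have
--         ## 1) same length
--         ## 2) characters before wildcard matching exactly
--         ## 3) characters after the wildcard matching exactly
--         if len(a_word) == len(word) and (till_wildcard == a_word[0:wildcard_index]) and (after_wildcard == a_word[wildcard_index+1:]) :
--             possible_words.append(a_word)
--
--     # from the posssible words list from above, check if any word(s) in that list is such that,
--     # a vowel can occupies the place of wildcard ('*')
--     for a_word in possible_words:
--         if a_word[wildcard_index] in VOWELS:
--             return True
--             #possible_with_vowels.append(a_word)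
--
--             # small optimization, since atleast one word is possible end
--             #break
--
-- #    if len(possible_with_vowels) > 0:
-- #        return True
--     return False
-- ===== SOURCE B (Python) =====
-- VOWELS = 'aeiou'
--
-- def isWildcardWordValid(word, wildcard_index, word_list):
--     n = len(word)
--     i = wildcard_index + n if wildcard_index < 0 else wildcard_index
--     if i < 0 or i >= n:
--         return False
--     words = set(word_list)
--     return any(word[:i] + v + word[i+1:] in words for v in VOWELS)
-- ===== Notes on version B (the rewrite author's own statement) =====
-- stated objective: simpler
-- what changed: Instead of scanning the whole word list and comparing prefix/suffix slices of every word, B normalises the wildcard index, builds the at most five candidate words till+vowel+after and tests each for membership in a set built once from word_list.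
-- intended difference: At wildcard_index = -1 A's slice word[wildcard_index+1:] wraps to the whole word, so A returns True only when the wildcard word itself is listed and ends in a vowel; on inputs where a listed word completes word's prefix with a vowel but word itself is not such a listed word, A returns False while B returns True, the intended value (the wildcard stands at the last position). — e.g. on isWildcardWordValid("cb", -1, ["ca"]): A returns false, B returns true
import Mathlib
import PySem

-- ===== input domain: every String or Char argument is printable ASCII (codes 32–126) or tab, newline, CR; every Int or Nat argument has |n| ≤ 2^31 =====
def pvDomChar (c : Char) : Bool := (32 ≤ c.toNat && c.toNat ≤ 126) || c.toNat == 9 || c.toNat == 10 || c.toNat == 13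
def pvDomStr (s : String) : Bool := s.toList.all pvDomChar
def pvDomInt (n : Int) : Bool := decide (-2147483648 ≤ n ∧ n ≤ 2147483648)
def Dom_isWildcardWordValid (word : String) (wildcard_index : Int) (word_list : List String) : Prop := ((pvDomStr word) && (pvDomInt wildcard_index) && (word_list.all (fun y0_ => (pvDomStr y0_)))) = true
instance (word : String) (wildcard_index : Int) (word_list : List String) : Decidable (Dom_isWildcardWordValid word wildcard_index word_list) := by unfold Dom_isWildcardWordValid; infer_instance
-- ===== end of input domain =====

-- B normalises the wildcard index, builds the ≤5 candidate words till+vowel+after and tests them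
-- against a set built once from word_list, instead of A's scan of the whole list with slice
-- comparisons: simpler and shorter. At wildcard_index = -1 B returns the intended value where A's
-- wraparound slice makes it wrong (see D_ below).

-- VOWELS = 'aeiou' (shared module constant, as a list of chars)
def pvVOWELS : List Char := ['a', 'e', 'i', 'o', 'u']

-- ===== PORT A =====
-- Strings are handled through .toList so every operation is a PySem/Chars primitive (exact).
def isWildcardWordValid (word : String) (wildcard_index : Int) (word_list : List String) : Bool :=
  let w := word.toList
  -- till_wildcard = word[:wildcard_index]
  let till := PySem.List.slice w none (some wildcard_index)
  -- after_wildcard = word[wildcard_index+1:]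
  let after := PySem.List.slice w (some (wildcard_index + 1)) none
  -- first loop: possible_words.append(a_word) under the three-part condition
  let possible : List String := word_list.foldl (fun acc a_word =>
    if a_word.toList.length == w.length
        && (till == PySem.List.slice a_word.toList (some 0) (some wildcard_index))
        && (after == PySem.List.slice a_word.toList (some (wildcard_index + 1)) none)
    then acc ++ [a_word] else acc) []
  -- second loop: return True on the first a_word with a_word[wildcard_index] in VOWELS
  possible.any (fun a_word =>
    match PySem.List.pyGet? a_word.toList wildcard_index with
    | some c => pvVOWELS.contains c   -- a single char `in VOWELS` is membership
    | none => false)                  -- Python raises IndexError here; excluded by Pre_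

-- ===== PORT B =====
def isWildcardWordValid_alt (word : String) (wildcard_index : Int) (word_list : List String) : Bool :=
  -- n = len(word); i = wildcard_index + n if wildcard_index < 0 else wildcard_index
  let n : Int := word.toList.length
  let i : Int := if wildcard_index < 0 then wildcard_index + n else wildcard_index
  -- if i < 0 or i >= n: return False
  if i < 0 || n ≤ i then false
  else
    -- words = set(word_list)
    let words : PySem.Set (List Char) := PySem.Set.ofList (word_list.map String.toList)
    -- any(word[:i] + v + word[i+1:] in words for v in VOWELS)
    pvVOWELS.any (fun v => PySem.Set.contains words
      (PySem.List.slice word.toList none (some i) ++ v :: PySem.List.slice word.toList (some (i + 1)) none))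

-- ===== PRECONDITION & SPEC =====
-- Pre_ is exactly the no-exception condition: A raises IndexError (at a_word[wildcard_index]) iff
-- wildcard_index is out of range for word AND word itself occurs in word_list; Pre_ excludes
-- precisely those inputs and nothing else.
def Pre_isWildcardWordValid (word : String) (wildcard_index : Int) (word_list : List String) : Prop :=
  PySem.Raise.InRange word.toList.length wildcard_index ∨ word ∉ word_list
instance (word : String) (wildcard_index : Int) (word_list : List String) : Decidable (Pre_isWildcardWordValid word wildcard_index word_list) := by unfold Pre_isWildcardWordValid; infer_instance

def pvWitness_isWildcardWordValid : String × Int × List String := ("c*t", 1, ["cat", "cbt"])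

-- At wildcard_index = -1 A's 'after' slice word[wildcard_index+1:] wraps to word[0:] (the whole
-- word), so A returns True only when the wildcard word itself is listed and ends in a vowel, and
-- returns False on the inputs below where a listed word completes word's prefix with a vowel;
-- B returns True there, the intended value (the wildcard stands at the last position).
def D_isWildcardWordValid (word : String) (wildcard_index : Int) (word_list : List String) : Prop :=
  wildcard_index = -1 ∧ word ≠ "" ∧
  ("aeiou".toList.any fun v => (word_list.map String.toList).contains (word.toList.dropLast ++ [v])) ∧
  !(word_list.contains word && ("aeiou".toList.any fun c => word.toList.getLast? == some c))
instance (word : String) (wildcard_index : Int) (word_list : List String) : Decidable (D_isWildcardWordValid word wildcard_index word_list) := by unfold D_isWildcardWordValid; infer_instance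

def Spec_isWildcardWordValid (word : String) (wildcard_index : Int) (word_list : List String) (out : Bool) : Prop := ¬ D_isWildcardWordValid word wildcard_index word_list → out = isWildcardWordValid_alt word wildcard_index word_list
instance (word : String) (wildcard_index : Int) (word_list : List String) (out : Bool) : Decidable (Spec_isWildcardWordValid word wildcard_index word_list out) := by unfold Spec_isWildcardWordValid; infer_instance

def pvDiffWitness_isWildcardWordValid : String × Int × List String := ("cb", -1, ["ca"])
def pvDiffWitnessOut_isWildcardWordValid : Bool × Bool := (false, true)

-- ===== CLAIM (what is proved, stated in full; the proofs are below) =====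
def Claim_unchanged_isWildcardWordValid : Prop := ∀ (word : String) (wildcard_index : Int) (word_list : List String), Dom_isWildcardWordValid word wildcard_index word_list → Pre_isWildcardWordValid word wildcard_index word_list → Spec_isWildcardWordValid word wildcard_index word_list (isWildcardWordValid word wildcard_index word_list)
def Claim_changed_isWildcardWordValid : Prop := Dom_isWildcardWordValid (pvDiffWitness_isWildcardWordValid.1) (pvDiffWitness_isWildcardWordValid.2.1) (pvDiffWitness_isWildcardWordValid.2.2) ∧ Pre_isWildcardWordValid (pvDiffWitness_isWildcardWordValid.1) (pvDiffWitness_isWildcardWordValid.2.1) (pvDiffWitness_isWildcardWordValid.2.2) ∧ D_isWildcardWordValid (pvDiffWitness_isWildcardWordValid.1) (pvDiffWitness_isWildcardWordValid.2.1) (pvDiffWitness_isWildcardWordValid.2.2) ∧ isWildcardWordValid (pvDiffWitness_isWildcardWordValid.1) (pvDiffWitness_isWildcardWordValid.2.1) (pvDiffWitness_isWildcardWordValid.2.2) = pvDiffWitnessOut_isWildcardWordValid.1 ∧ isWildcardWordValid_alt (pvDiffWitness_isWildcardWordValid.1) (pvDiffWitness_isWildcardWordValid.2.1) (pvDiffWitness_isWildcardWordValid.2.2)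 = pvDiffWitnessOut_isWildcardWordValid.2 ∧ pvDiffWitnessOut_isWildcardWordValid.1 ≠ pvDiffWitnessOut_isWildcardWordValid.2
def Claim_exact_isWildcardWordValid : Prop := ∀ (word : String) (wildcard_index : Int) (word_list : List String), Dom_isWildcardWordValid word wildcard_index word_list → Pre_isWildcardWordValid word wildcard_index word_list → D_isWildcardWordValid word wildcard_index word_list → isWildcardWordValid word wildcard_index word_list ≠ isWildcardWordValid_alt word wildcard_index word_list

-- ===== LEMMAS AND PROOFS =====

-- A's inner vowel test (a match on the indexing result) as an existential.
lemma pv_match_iff (o : Option Char) :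
    ((match o with | some c => pvVOWELS.contains c | none => false) = true)
    ↔ ∃ c, o = some c ∧ c ∈ pvVOWELS := by
  cases o <;> simp

-- D_ (stated compactly with Bool tests) unfolded to the propositional form the proofs use.
lemma pv_D_iff (word : String) (wi : Int) (wl : List String) :
    D_isWildcardWordValid word wi wl ↔
    (wi = -1 ∧ word.toList ≠ [] ∧
      (∃ v ∈ pvVOWELS, word.toList.dropLast ++ [v] ∈ wl.map String.toList) ∧
      ¬(word ∈ wl ∧ ∃ c ∈ pvVOWELS, word.toList.getLast? = some c)) := by
  unfold D_isWildcardWordValid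
  rw [show "aeiou".toList = pvVOWELS from rfl]
  have hne : (word ≠ "") ↔ word.toList ≠ [] := by
    constructor
    · intro h hc
      exact h (by cases word with | _ l => cases l <;> simp_all)
    · intro h hc
      exact h (by rw [hc]; rfl)
  simp only [List.any_eq_true, List.contains_iff_mem, Bool.not_eq_eq_eq_not,
    Bool.not_true, Bool.and_eq_false_iff, hne]
  constructor
  · rintro ⟨h1, h2, ⟨v, hv, hm⟩, h4⟩
    refine ⟨h1, h2, ⟨v, hv, hm⟩, ?_⟩
    rintro ⟨hw, c, hc, he⟩
    rcases h4 with h4 | h4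
    · have hct := List.contains_iff_mem.mpr hw
      rw [h4] at hct
      exact Bool.false_ne_true hct
    · rw [List.any_eq_false] at h4
      exact h4 c hc (beq_iff_eq.mpr he)
  · rintro ⟨h1, h2, ⟨v, hv, hm⟩, h4⟩
    refine ⟨h1, h2, ⟨v, hv, hm⟩, ?_⟩
    by_cases hw : word ∈ wl
    · right
      rw [List.any_eq_false]
      intro c hc hbe
      exact h4 ⟨hw, c, hc, beq_iff_eq.mp hbe⟩
    · left
      rw [Bool.eq_false_iff]
      intro hc
      exact hw (List.contains_iff_mem.mp hc)

-- A word of the right length agrees with word outside position m and has a vowel at m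
-- ↔ it is one of B's reconstructed candidates.
lemma pv_split_iff (w la V : List Char) (m : Nat) (hm : m < w.length) :
    (la.length = w.length ∧ w.take m = la.take m ∧ w.drop (m + 1) = la.drop (m + 1) ∧
      ∃ c, la[m]? = some c ∧ c ∈ V)
    ↔ ∃ v ∈ V, la = w.take m ++ v :: w.drop (m + 1) := by
  constructor
  · rintro ⟨hlen, ht, hd, c, hc, hcv⟩
    have hm' : m < la.length := by omega
    have hc' : la[m] = c := by
      rw [List.getElem?_eq_getElem hm'] at hc; exact Option.some.inj hc
    refine ⟨c, hcv, ?_⟩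
    rw [ht, hd, ← hc']
    conv_lhs => rw [← List.take_append_drop m la]
    rw [List.drop_eq_getElem_cons hm']
  · rintro ⟨v, hv, rfl⟩
    have htl : (w.take m).length = m := by simp; omega
    have h3 : ∀ (xs ys : List Char) (u : Char), (xs ++ u :: ys).drop (xs.length + 1) = ys := by
      intro xs ys u; simp
    refine ⟨by simp [htl]; omega, ?_, ?_, ⟨v, ?_, hv⟩⟩
    · rw [List.take_append_of_le_length (by omega), List.take_take]
      simp
    · rw [show m + 1 = (w.take m).length + 1 from by omega, h3]
    · rw [List.getElem?_append_right (by omega)]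
      simp [htl]

-- The two ports agree once all slicing/indexing is normalised to take/drop/getElem? at a
-- single Nat position m (the hypotheses are established separately for wildcard_index ≥ 0
-- and for the in-range negative wildcard_index).
lemma pv_main (wl : List String) (w : List Char) (wi : Int) (m : Nat) (hm : m < w.length)
    (hts : PySem.List.slice w none (some wi) = w.take m)
    (has : PySem.List.slice w (some (wi+1)) none = w.drop (m+1))
    (htsl : ∀ l : List Char, l.length = w.length → PySem.List.slice l (some 0) (some wi) = l.take m)
    (hasl : ∀ l : List Char, l.length = w.length → PySem.List.slice l (some (wi+1)) none = l.drop (m+1))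
    (hg : ∀ l : List Char, l.length = w.length → PySem.List.pyGet? l wi = l[m]?) :
    (wl.foldl (fun acc a => if (a.toList.length == w.length
          && (PySem.List.slice w none (some wi) == PySem.List.slice a.toList (some 0) (some wi))
          && (PySem.List.slice w (some (wi+1)) none == PySem.List.slice a.toList (some (wi+1)) none))
        then acc ++ [a] else acc) []).any (fun a => match PySem.List.pyGet? a.toList wi with
          | some c => pvVOWELS.contains c | none => false)
    = pvVOWELS.any (fun v => PySem.Set.contains (PySem.Set.ofList (wl.map String.toList))
        (w.take m ++ v :: w.drop (m + 1))) := by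
  have hsetmem : ∀ c : List Char,
      (PySem.Set.contains (PySem.Set.ofList (wl.map String.toList)) c = true)
      ↔ c ∈ wl.map String.toList := by
    intro c; simp [PySem.Set.mem_ofList]
  rw [PySem.List.foldl_append_if_eq_filter, List.nil_append, List.any_filter, Bool.eq_iff_iff]
  simp only [List.any_eq_true]
  constructor
  · rintro ⟨a, ha, hcond⟩
    simp only [Bool.and_eq_true, beq_iff_eq] at hcond
    obtain ⟨⟨⟨hlen, ht⟩, hd⟩, hq⟩ := hcond
    rw [hg _ hlen, pv_match_iff] at hq
    rw [hts, htsl _ hlen] at ht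
    rw [has, hasl _ hlen] at hd
    obtain ⟨v, hvv, hla⟩ := (pv_split_iff w a.toList pvVOWELS m hm).mp ⟨hlen, ht, hd, hq⟩
    refine ⟨v, hvv, ?_⟩
    rw [hsetmem, List.mem_map]
    exact ⟨a, ha, hla⟩
  · rintro ⟨v, hvv, hmem⟩
    rw [hsetmem, List.mem_map] at hmem
    obtain ⟨a, ha, hla⟩ := hmem
    obtain ⟨hlen, ht, hd, hq⟩ :=
      (pv_split_iff w a.toList pvVOWELS m hm).mpr ⟨v, hvv, hla⟩
    refine ⟨a, ha, ?_⟩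
    simp only [Bool.and_eq_true, beq_iff_eq]
    refine ⟨⟨⟨hlen, by rw [hts, htsl _ hlen]; exact ht⟩, by rw [has, hasl _ hlen]; exact hd⟩, ?_⟩
    rw [hg _ hlen, pv_match_iff]
    exact hq

-- With wildcard_index past either end of word, A's vowel test indexes out of range on every
-- candidate (they all have word's length), so A's port yields False.
lemma pv_A_oor (wl : List String) (w : List Char) (wi : Int)
    (hoor : ¬ PySem.Raise.InRange w.length wi) :
    (wl.foldl (fun acc a => if (a.toList.length == w.length
          && (PySem.List.slice w none (some wi) == PySem.List.slice a.toList (some 0) (some wi))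
          && (PySem.List.slice w (some (wi+1)) none == PySem.List.slice a.toList (some (wi+1)) none))
        then acc ++ [a] else acc) []).any (fun a => match PySem.List.pyGet? a.toList wi with
          | some c => pvVOWELS.contains c | none => false) = false := by
  rw [PySem.List.foldl_append_if_eq_filter, List.nil_append, List.any_eq_false]
  intro a ha
  have hpa := List.of_mem_filter ha
  simp only [Bool.and_eq_true, beq_iff_eq] at hpa
  have hnone : PySem.List.pyGet? a.toList wi = none := by
    rw [PySem.List.pyGet?_eq_none_iff]
    exact fun h => hoor (hpa.1.1 ▸ h)
  simp [hnone]

-- At wildcard_index = -1 on a nonempty word, A's filter condition forces a_word = word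
-- (the 'after' comparison is word[0:] == a_word[0:]), so A returns
-- "word is listed and ends in a vowel".
lemma pv_A_neg_one (wl : List String) (word : String) :
    (wl.foldl (fun acc a => if (a.toList.length == word.toList.length
          && (PySem.List.slice word.toList none (some (-1)) == PySem.List.slice a.toList (some 0) (some (-1)))
          && (PySem.List.slice word.toList (some (-1+1)) none == PySem.List.slice a.toList (some (-1+1)) none))
        then acc ++ [a] else acc) []).any (fun a => match PySem.List.pyGet? a.toList (-1) with
          | some c => pvVOWELS.contains c | none => false)
    = decide (word ∈ wl ∧ ∃ c ∈ pvVOWELS, word.toList.getLast? = some c) := by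
  have h0 : ∀ l : List Char, PySem.List.slice l (some ((-1:Int)+1)) none = l := by
    intro l
    rw [show ((-1:Int)+1) = ((0:Nat):Int) from by norm_num, PySem.List.slice_from_natCast]
    simp
  have hcond : ∀ a : String,
      (a.toList.length == word.toList.length
        && (PySem.List.slice word.toList none (some (-1)) == PySem.List.slice a.toList (some 0) (some (-1)))
        && (PySem.List.slice word.toList (some (-1+1)) none == PySem.List.slice a.toList (some (-1+1)) none))
      = (a == word) := by
    intro a
    rw [Bool.eq_iff_iff]
    simp only [Bool.and_eq_true, beq_iff_eq, h0]
    constructor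
    · rintro ⟨-, he⟩
      exact String.ext he.symm
    · rintro rfl
      exact ⟨⟨rfl, rfl⟩, rfl⟩
  simp only [hcond]
  rw [PySem.List.foldl_append_if_eq_filter, List.nil_append, Bool.eq_iff_iff, List.any_eq_true]
  simp only [List.mem_filter, beq_iff_eq, decide_eq_true_eq]
  constructor
  · rintro ⟨a, ⟨ha, rfl⟩, hq⟩
    rw [PySem.List.pyGet?_neg_one, pv_match_iff] at hq
    obtain ⟨c, h1, h2⟩ := hq
    exact ⟨ha, c, h2, h1⟩
  · rintro ⟨ha, c, hcv, hc⟩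
    refine ⟨word, ⟨ha, rfl⟩, ?_⟩
    rw [PySem.List.pyGet?_neg_one, pv_match_iff]
    exact ⟨c, hc, hcv⟩

-- B at wildcard_index = -1 on a nonempty word: the candidates are dropLast word ++ [v].
lemma pv_B_neg_one (wl : List String) (word : String) (hw : word.toList ≠ []) :
    isWildcardWordValid_alt word (-1) wl
    = pvVOWELS.any (fun v => decide (word.toList.dropLast ++ [v] ∈ wl.map String.toList)) := by
  have hn : 1 ≤ word.toList.length := List.length_pos_iff.mpr hw
  simp only [isWildcardWordValid_alt]
  rw [if_pos (show (-1:Int) < 0 from by norm_num)]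
  rw [if_neg (show ¬((decide ((-1:Int) + (word.toList.length : Int) < 0)
      || decide ((word.toList.length : Int) ≤ (-1:Int) + (word.toList.length : Int))) = true) from by
    simp only [Bool.or_eq_true, decide_eq_true_eq, not_or, not_lt, not_le]
    constructor <;> omega)]
  rw [show (-1:Int) + (word.toList.length : Int) = (((word.toList.length - 1 : Nat)) : Int) from by
    push_cast [hn]; omega]
  rw [PySem.List.slice_to_natCast]
  rw [show (((word.toList.length - 1 : Nat)) : Int) + 1 = ((word.toList.length : Nat) : Int) from by
    push_cast [hn]; omega]
  rw [PySem.List.slice_from_natCast]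
  simp only [List.drop_length]
  congr 1
  funext v
  rw [← List.dropLast_eq_take]
  simp [PySem.Set.mem_ofList]

-- A listed word ending in a vowel is itself one of B's candidates.
lemma pv_AtoB (wl : List String) (word : String)
    (h : word ∈ wl ∧ ∃ c ∈ pvVOWELS, word.toList.getLast? = some c) :
    ∃ v ∈ pvVOWELS, word.toList.dropLast ++ [v] ∈ wl.map String.toList := by
  obtain ⟨hmem, c, hcv, hc⟩ := h
  have hne : word.toList ≠ [] := by
    intro h; rw [h] at hc; simp at hc
  have hcc : word.toList.getLast hne = c := by
    rw [List.getLast?_eq_some_getLast (h := hne)] at hc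
    exact Option.some.inj hc
  refine ⟨c, hcv, ?_⟩
  rw [← hcc, List.dropLast_append_getLast hne]
  exact List.mem_map_of_mem hmem

-- ===== VERDICT (by name: the statement is the Claim_ definition above) =====
theorem isWildcardWordValid_spec : Claim_unchanged_isWildcardWordValid := by
  intro word wi wl _ hpre hnd
  simp only [isWildcardWordValid]
  by_cases h0 : 0 ≤ wi ∧ wi < (word.toList.length : Int)
  · -- 0 ≤ wildcard_index < len(word)
    obtain ⟨m, rfl⟩ : ∃ m : Nat, wi = (m : Int) := ⟨wi.toNat, (Int.toNat_of_nonneg h0.1).symm⟩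
    have hm : m < word.toList.length := by exact_mod_cast h0.2
    rw [pv_main wl word.toList (m : Int) m hm
      (PySem.List.slice_to_natCast word.toList m)
      (by rw [show (m : Int) + 1 = ((m + 1 : Nat) : Int) from by push_cast; ring]
          exact PySem.List.slice_from_natCast word.toList (m + 1))
      (fun l _ => by rw [PySem.List.slice_zero_start]; exact PySem.List.slice_to_natCast l m)
      (fun l _ => by rw [show (m : Int) + 1 = ((m + 1 : Nat) : Int) from by push_cast; ring]
                     exact PySem.List.slice_from_natCast l (m + 1))
      (fun l _ => PySem.List.pyGet?_natCast l m)]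
    simp only [isWildcardWordValid_alt]
    rw [if_neg (show ¬((m : Int) < 0) from by omega)]
    rw [if_neg (show ¬((decide ((m : Int) < 0)
        || decide ((word.toList.length : Int) ≤ (m : Int))) = true) from by
      simp only [Bool.or_eq_true, decide_eq_true_eq, not_or, not_lt, not_le]
      constructor <;> omega)]
    rw [PySem.List.slice_to_natCast]
    rw [show (m : Int) + 1 = ((m + 1 : Nat) : Int) from by push_cast; ring,
      PySem.List.slice_from_natCast]
  by_cases h1 : -(word.toList.length : Int) ≤ wi ∧ wi ≤ -2
  · -- -len(word) ≤ wildcard_index ≤ -2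
    obtain ⟨k, rfl⟩ : ∃ k : Nat, wi = -(k : Int) := ⟨(-wi).toNat, by omega⟩
    have hk2 : 2 ≤ k := by omega
    have hkn : k ≤ word.toList.length := by omega
    have hm : word.toList.length - k < word.toList.length := by omega
    have hstep : ∀ l : List Char, l.length = word.toList.length →
        PySem.List.slice l (some (-(k : Int) + 1)) none = l.drop (word.toList.length - k + 1) := by
      intro l hl
      rw [show -(k : Int) + 1 = -((k - 1 : Nat) : Int) from by omega]
      rw [PySem.List.slice_from_neg_natCast l (k - 1) (by omega), hl]
      congr 1
      omega
    rw [pv_main wl word.toList (-(k : Int)) (word.toList.length - k) hm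
      (PySem.List.slice_to_neg_natCast word.toList k (by omega))
      (hstep word.toList rfl)
      (fun l hl => by
        rw [PySem.List.slice_zero_start, PySem.List.slice_to_neg_natCast l k (by omega), hl])
      hstep
      (fun l hl => by rw [PySem.List.pyGet?_neg_natCast l k (by omega) (by omega), hl])]
    simp only [isWildcardWordValid_alt]
    rw [if_pos (show -(k : Int) < 0 from by omega)]
    rw [if_neg (show ¬((decide (-(k : Int) + (word.toList.length : Int) < 0)
        || decide ((word.toList.length : Int) ≤ -(k : Int) + (word.toList.length : Int))) = true) from by
      simp only [Bool.or_eq_true, decide_eq_true_eq, not_or, not_lt, not_le]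
      constructor <;> omega)]
    rw [show -(k : Int) + (word.toList.length : Int) = (((word.toList.length - k : Nat)) : Int) from by
      push_cast [hkn]; omega]
    rw [PySem.List.slice_to_natCast]
    rw [show (((word.toList.length - k : Nat)) : Int) + 1 = ((word.toList.length - k + 1 : Nat) : Int) from by
      push_cast [hkn]; omega]
    rw [PySem.List.slice_from_natCast]
  by_cases hneg1 : wi = -1
  · -- wildcard_index = -1
    subst hneg1
    by_cases hw : word.toList = []
    · -- empty word: both sides are False
      rw [pv_A_oor wl word.toList (-1)
        (by simp only [PySem.Raise.InRange, hw, List.length_nil]; omega)]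
      simp [isWildcardWordValid_alt, hw]
    · rw [pv_A_neg_one wl word, pv_B_neg_one wl word hw]
      have hDrw : ¬ ((∃ v ∈ pvVOWELS, word.toList.dropLast ++ [v] ∈ wl.map String.toList) ∧
          ¬(word ∈ wl ∧ ∃ c ∈ pvVOWELS, word.toList.getLast? = some c)) := by
        rintro ⟨hB, hA⟩
        exact hnd ((pv_D_iff word (-1) wl).mpr ⟨rfl, hw, hB, hA⟩)
      rcases Decidable.em (word ∈ wl ∧ ∃ c ∈ pvVOWELS, word.toList.getLast? = some c) with hA | hA
      · rw [decide_eq_true hA]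
        obtain ⟨v, hv, hmem⟩ := pv_AtoB wl word hA
        symm
        rw [List.any_eq_true]
        exact ⟨v, hv, decide_eq_true hmem⟩
      · rw [decide_eq_false hA]
        symm
        rw [List.any_eq_false]
        intro v hv
        simp only [decide_eq_true_eq]
        intro hmem
        exact hDrw ⟨⟨v, hv, hmem⟩, hA⟩
  · -- out of range (wi ≥ len or wi < -len, wi ≠ -1): A yields False, B's guard yields False
    have hoor : ¬ PySem.Raise.InRange word.toList.length wi := by
      simp only [PySem.Raise.InRange]; omega
    rw [pv_A_oor wl word.toList wi hoor]
    simp only [isWildcardWordValid_alt]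
    rw [if_pos (show ((decide ((if wi < 0 then wi + (word.toList.length : Int) else wi) < 0)
        || decide ((word.toList.length : Int) ≤ (if wi < 0 then wi + (word.toList.length : Int) else wi))) = true) from by
      simp only [Bool.or_eq_true, decide_eq_true_eq]
      by_cases hlt : wi < 0
      · simp only [if_pos hlt]; omega
      · simp only [if_neg hlt]; omega)]

theorem isWildcardWordValid_changed : Claim_changed_isWildcardWordValid := by
  unfold Claim_changed_isWildcardWordValid; decide

theorem isWildcardWordValid_tight : Claim_exact_isWildcardWordValid := by
  intro word wi wl _ _ hd
  obtain ⟨rfl, hw, hB, hA⟩ := (pv_D_iff word wi wl).mp hd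
  simp only [isWildcardWordValid]
  rw [pv_A_neg_one wl word, pv_B_neg_one wl word hw]
  rw [decide_eq_false hA]
  obtain ⟨v, hv, hmem⟩ := hB
  intro hcontra
  have hbt : (pvVOWELS.any (fun v => decide (word.toList.dropLast ++ [v] ∈ wl.map String.toList))) = true := by
    rw [List.any_eq_true]
    exact ⟨v, hv, decide_eq_true hmem⟩
  rw [← hcontra] at hbt
  exact Bool.false_ne_true hbt
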